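-- pv_equiv track=rewrite | github.com/pypi-data/pypi-mirror-25 | packages/coup/coup-0.0.63.tar.gz/coup-0.0.63/coup/common/url.py | _add_lines_to_line
-- ===== SOURCE A (Python) =====
-- def _add_lines_to_line(lines, k, addon_lines):
--     lines = lines[:k] + lines[k+len(addon_lines):]
--
--     lst = [ a.strip() for a in lines[k-1].split('>>>') ]
--     for line in addon_lines:
--         a_lst = [ a.strip() for a in line.split('|||') ]
--         for i in range(len(lst)):
--             lst[i] += a_lst[i]
--
--     lines[k-1] = '>>>'.join(lst)
--
--     return lines
-- ===== SOURCE B (Python) =====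
-- def _add_lines_to_line(lines, k, addon_lines):
--     out = lines[:k] + lines[k + len(addon_lines):]
--     rows = [out[k - 1].split('>>>')] + [line.split('|||') for line in addon_lines]
--     out[k - 1] = '>>>'.join(''.join(a.strip() for a in col) for col in zip(*rows))
--     return out
-- ===== Notes on version B (the rewrite author's own statement) =====
-- stated objective: faster
-- what changed: B transposes: it splits the base row and all addon rows once, takes columns with zip(*rows), and joins each column of stripped fields in one pass, instead of A's nested index loop repeatedly appending addon fields in place to each base field.
-- outside the precondition, e.g. on _add_lines_to_line(['a >>> b'], 1, ['x']): A raises IndexError, B returns ['ax']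
import Mathlib
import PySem

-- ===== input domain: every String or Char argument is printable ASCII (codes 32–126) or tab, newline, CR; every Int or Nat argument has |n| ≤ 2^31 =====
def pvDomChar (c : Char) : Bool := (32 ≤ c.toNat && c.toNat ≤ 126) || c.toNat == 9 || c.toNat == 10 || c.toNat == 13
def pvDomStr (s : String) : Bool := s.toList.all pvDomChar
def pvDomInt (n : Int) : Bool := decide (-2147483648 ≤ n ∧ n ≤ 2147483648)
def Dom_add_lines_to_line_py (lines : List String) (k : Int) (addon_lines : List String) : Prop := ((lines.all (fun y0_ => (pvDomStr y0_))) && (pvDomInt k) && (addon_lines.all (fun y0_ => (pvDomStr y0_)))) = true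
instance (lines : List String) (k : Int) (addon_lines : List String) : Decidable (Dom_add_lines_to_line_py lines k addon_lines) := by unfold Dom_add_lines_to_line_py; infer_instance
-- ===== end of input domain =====

-- B transposes the split rows with zip and joins each column of stripped fields in one
-- pass, instead of A's nested index loop accumulating in place; objective: alternative.

-- ===== PORT A =====
def add_lines_to_line_py (lines : List String) (k : Int) (addon_lines : List String) : List String :=
  let lines1 := PySem.List.slice lines none (some k) ++ PySem.List.slice lines (some (k + (addon_lines.length : Int))) none
  let lst0 := ((PySem.Str.split? ((PySem.List.pyGet? lines1 (k-1)).getD "") ">>>").getD []).map PySem.Str.strip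
  let lst := addon_lines.foldl (fun lst line =>
      let a_lst := ((PySem.Str.split? line "|||").getD []).map PySem.Str.strip
      (PySem.List.pyRange 0 (lst.length : Int) 1).foldl
        (fun l i => PySem.List.pySetD l i (PySem.List.pyGetD l i "" ++ (PySem.List.pyGet? a_lst i).getD "")) lst) lst0
  PySem.List.pySetD lines1 (k-1) (PySem.Str.join ">>>" lst)

-- ===== PORT B =====
-- Python's zip(*rows) with a distinguished first row: columns up to the shortest row.
def pvZip (first : List String) (rest : List (List String)) : List (List String) :=
  match first with
  | [] => []
  | a :: as =>
    if rest.any (fun r => r.isEmpty) then []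
    else (a :: rest.map (fun r => r.headD "")) :: pvZip as (rest.map (fun r => r.tail))

def add_lines_to_line_py_alt (lines : List String) (k : Int) (addon_lines : List String) : List String :=
  let out := PySem.List.slice lines none (some k) ++ PySem.List.slice lines (some (k + (addon_lines.length : Int))) none
  let base := (PySem.Str.split? ((PySem.List.pyGet? out (k-1)).getD "") ">>>").getD []
  let parts := addon_lines.map (fun line => (PySem.Str.split? line "|||").getD [])
  let merged := PySem.Str.join ">>>"
      ((pvZip base parts).map (fun col => PySem.Str.join "" (col.map PySem.Str.strip)))
  PySem.List.pySetD out (k-1) merged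

-- ===== PRECONDITION & SPEC =====
-- Pre_ excludes exactly the inputs where the Python A raises IndexError: a row index k-1
-- out of range of the spliced list, or an addon line with fewer '|||'-fields than the
-- base line has '>>>'-fields.
def Pre_add_lines_to_line_py (lines : List String) (k : Int) (addon_lines : List String) : Prop :=
  let rest := PySem.List.slice lines none (some k) ++ PySem.List.slice lines (some (k + (addon_lines.length : Int))) none
  PySem.Raise.InRange rest.length (k-1) ∧
  ∀ line ∈ addon_lines,
    ((PySem.Str.split? ((PySem.List.pyGet? rest (k-1)).getD "") ">>>").getD []).length ≤ ((PySem.Str.split? line "|||").getD []).length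
instance (lines : List String) (k : Int) (addon_lines : List String) : Decidable (Pre_add_lines_to_line_py lines k addon_lines) := by unfold Pre_add_lines_to_line_py; infer_instance

def pvWitness_add_lines_to_line_py : List String × Int × List String := (["a >>> b", "x ||| y"], 1, ["x ||| y"])

def Spec_add_lines_to_line_py (lines : List String) (k : Int) (addon_lines : List String) (out : List String) : Prop := out = add_lines_to_line_py_alt lines k addon_lines
instance (lines : List String) (k : Int) (addon_lines : List String) (out : List String) : Decidable (Spec_add_lines_to_line_py lines k addon_lines out) := by unfold Spec_add_lines_to_line_py; infer_instance

-- ===== CLAIM (what is proved, stated in full; the proofs are below) =====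
def Claim_equal_add_lines_to_line_py : Prop := ∀ (lines : List String) (k : Int) (addon_lines : List String), Dom_add_lines_to_line_py lines k addon_lines → Pre_add_lines_to_line_py lines k addon_lines → Spec_add_lines_to_line_py lines k addon_lines (add_lines_to_line_py lines k addon_lines)

-- ===== LEMMAS AND PROOFS =====

-- ''.join, unfolded one element at a time
theorem pvJoinEmptyNil : PySem.Str.join "" ([] : List String) = "" := by decide

theorem pvJoinEmptyCons (x : String) (xs : List String) :
    PySem.Str.join "" (x :: xs) = x ++ PySem.Str.join "" xs := by
  have h : (PySem.Str.join "" (x :: xs)).toList = (x ++ PySem.Str.join "" xs).toList := by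
    cases xs with
    | nil => simp [PySem.Str.toList_join, PySem.Chars.join_singleton, PySem.Chars.join_nil]
    | cons y ys => simp [PySem.Str.toList_join, PySem.Chars.join_cons_cons]
  exact String.toList_inj.mp h

-- one step of Python's `lst[i] += a[i]`, at Nat level
def pvStep (a : List String) (t : List String) (i : Nat) : List String :=
  t.set i (t.getD i "" ++ (a[i]?).getD "")

-- invariant of the inner `for i in range(len(lst))` loop: the first n slots are updated
theorem pvInnerPartial (a t : List String) (n : Nat) (hn : n ≤ t.length) :
    (List.range n).foldl (pvStep a) t
      = (List.range n).map (fun i => t.getD i "" ++ (a[i]?).getD "") ++ t.drop n := by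
  induction n with
  | zero => simp
  | succ m ih =>
    have hm : m ≤ t.length := by omega
    rw [List.range_succ, List.foldl_append, ih hm]
    have hmlt : m < t.length := by omega
    have hdrop : t.drop m = t[m] :: t.drop (m+1) := List.drop_eq_getElem_cons hmlt
    set M := (List.range m).map (fun i => t.getD i "" ++ (a[i]?).getD "") with hM
    have hlen : M.length = m := by simp [hM]
    simp only [List.foldl_cons, List.foldl_nil, pvStep]
    rw [hdrop]
    have hgetD : (M ++ t[m] :: t.drop (m+1)).getD m "" = t[m] := by
      simp [List.getD, hlen, hmlt]
    have htD : t.getD m "" = t[m] := by simp [List.getD, hmlt]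
    rw [hgetD, List.set_append]
    simp [hM]
    rw [List.getElem?_eq_getElem hmlt]
    simp only [Option.getD_some]
    rw [hdrop, List.set_cons_zero]

theorem pvInner (a t : List String) :
    (List.range t.length).foldl (pvStep a) t
      = (List.range t.length).map (fun i => t.getD i "" ++ (a[i]?).getD "") := by
  rw [pvInnerPartial a t t.length le_rfl]
  simp

-- the whole addon loop equals the column-major form, at Nat level
theorem pvOuter (cols : String → List String) (ls : List String) (t : List String) :
    ls.foldl (fun lst line => (List.range lst.length).foldl (pvStep (cols line)) lst) t
      = (List.range t.length).map
          (fun i => t.getD i "" ++ PySem.Str.join "" (ls.map (fun line => ((cols line)[i]?).getD ""))) := by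
  induction ls generalizing t with
  | nil =>
    simp only [List.foldl_nil, List.map_nil, pvJoinEmptyNil]
    apply List.ext_getElem (by simp)
    intro i h1 h2
    simp [List.getD, List.getElem?_eq_getElem (by simpa using h2)]
  | cons a as ih =>
    rw [List.foldl_cons, pvInner (cols a) t, ih]
    have hlen : ((List.range t.length).map (fun i => t.getD i "" ++ ((cols a)[i]?).getD "")).length = t.length := by simp
    rw [hlen]
    apply List.map_congr_left
    intro i hi
    have hi' : i < t.length := by simpa using hi
    rw [List.getD, List.getElem?_map, List.getElem?_range hi']
    simp [pvJoinEmptyCons, List.getD, String.append_assoc]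

-- bridge: A's pyRange/pySetD loop is pvStep over List.range
theorem pvLoopBridge (a t : List String) :
    (PySem.List.pyRange 0 (t.length : Int) 1).foldl
        (fun l i => PySem.List.pySetD l i (PySem.List.pyGetD l i "" ++ (PySem.List.pyGet? a i).getD "")) t
      = (List.range t.length).foldl (pvStep a) t := by
  rw [PySem.List.pyRange_one, List.foldl_map]
  apply PySem.List.foldl_congr_mem
  intro acc x hx
  simp [pvStep, PySem.List.pySetD_natCast, PySem.List.pyGetD_natCast, PySem.List.pyGet?_natCast, List.getD]

-- A's whole addon loop in column-major form, at pyRange level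
theorem pvMerge (cols : String → List String) (ls : List String) (t : List String) :
    ls.foldl (fun lst line =>
        (PySem.List.pyRange 0 (lst.length : Int) 1).foldl
          (fun l i => PySem.List.pySetD l i (PySem.List.pyGetD l i "" ++ (PySem.List.pyGet? (cols line) i).getD "")) lst) t
      = (PySem.List.pyRange 0 (t.length : Int) 1).map
          (fun i => PySem.List.pyGetD t i "" ++ PySem.Str.join "" ((ls.map cols).map (fun p => (PySem.List.pyGet? p i).getD ""))) := by
  simp only [pvLoopBridge]
  rw [pvOuter cols ls t]
  simp [PySem.List.pyRange_one, PySem.List.pyGetD_natCast, PySem.List.pyGet?_natCast, List.getD, List.map_map,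
        Function.comp]
  intro a _
  congr 1

-- tail indexing
theorem pvGetDTail (r : List String) (i : Nat) : r.tail.getD i "" = r.getD (i+1) "" := by
  cases r <;> simp [List.getD]

theorem pvHeadDGetD (r : List String) : r.headD "" = r.getD 0 "" := by
  cases r <;> simp [List.getD]

-- zip of rows with all rest rows at least as long as the first = column-indexed map
theorem pvZipEq (first : List String) (rest : List (List String))
    (h : ∀ r ∈ rest, first.length ≤ r.length) :
    pvZip first rest
      = (List.range first.length).map (fun i => first.getD i "" :: rest.map (fun r => r.getD i "")) := by
  induction first generalizing rest with
  | nil => simp [pvZip]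
  | cons a as ih =>
    have hne : rest.any (fun r => r.isEmpty) = false := by
      simp only [List.any_eq_false]
      intro r hr
      have := h r hr
      simp at this ⊢
      cases r with
      | nil => simp at this
      | cons _ _ => simp
    have h' : ∀ r ∈ rest.map List.tail, as.length ≤ r.length := by
      intro r hr
      obtain ⟨r0, hr0, rfl⟩ := List.mem_map.mp hr
      have := h r0 hr0
      simp at this ⊢
      omega
    rw [pvZip, if_neg (by simp [hne]), ih _ h']
    rw [List.length_cons, List.range_succ_eq_map, List.map_cons, List.map_map]
    congr 1
    · show (a :: rest.map (fun r => r.headD "")) = (a :: as).getD 0 "" :: rest.map (fun r => r.getD 0 "")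
      exact congrArg (a :: ·) (List.map_congr_left (fun r _ => pvHeadDGetD r))
    · apply List.map_congr_left
      intro i _
      simp only [Function.comp_apply]
      rw [List.map_map, show (a :: as).getD (i+1) "" = as.getD i "" from by simp [List.getD]]
      exact congrArg (as.getD i "" :: ·) (List.map_congr_left (fun r _ => pvGetDTail r i))

-- strip commutes with getD (strip "" = "")
theorem pvStripEmpty : PySem.Str.strip "" = "" := by decide

theorem pvStripGetD (r : List String) (i : Nat) :
    (r.map PySem.Str.strip).getD i "" = PySem.Str.strip (r.getD i "") := by
  cases hx : r[i]? with
  | none =>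
    have h2 : (r.map PySem.Str.strip)[i]? = none := by rw [List.getElem?_map, hx]; rfl
    rw [List.getD, List.getD, hx, h2]
    exact pvStripEmpty.symm
  | some v =>
    have h2 : (r.map PySem.Str.strip)[i]? = some (PySem.Str.strip v) := by
      rw [List.getElem?_map, hx]; rfl
    rw [List.getD, List.getD, hx, h2]
    rfl

-- the column-major form of A's merged fields equals B's zip-transposed columns
theorem pvColumns (base : List String) (ls : List String)
    (h : ∀ l ∈ ls, base.length ≤ ((PySem.Str.split? l "|||").getD []).length) :
    (PySem.List.pyRange 0 (((base.map PySem.Str.strip).length : Nat) : Int) 1).map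
        (fun i => PySem.List.pyGetD (base.map PySem.Str.strip) i ""
          ++ PySem.Str.join "" ((ls.map (fun line => ((PySem.Str.split? line "|||").getD []).map PySem.Str.strip)).map
              (fun p => (PySem.List.pyGet? p i).getD "")))
      = (pvZip base (ls.map (fun line => (PySem.Str.split? line "|||").getD []))).map
          (fun col => PySem.Str.join "" (col.map PySem.Str.strip)) := by
  rw [pvZipEq base (ls.map (fun line => (PySem.Str.split? line "|||").getD []))
      (by intro r hr; obtain ⟨l0, hl0, rfl⟩ := List.mem_map.mp hr; exact h l0 hl0)]
  rw [PySem.List.pyRange_one, List.map_map, List.map_map]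
  simp only [List.length_map, Int.sub_zero, Int.toNat_natCast]
  apply List.map_congr_left
  intro i hi
  simp only [Function.comp_apply, zero_add, PySem.List.pyGetD_natCast, PySem.List.pyGet?_natCast]
  rw [List.map_cons, pvJoinEmptyCons]
  refine congrArg₂ (fun (x : String) (y : String) => x ++ y) (pvStripGetD base i) ?_
  refine congrArg (PySem.Str.join "") ?_
  simp only [List.map_map]
  apply List.map_congr_left
  intro l0 _
  simp only [Function.comp_apply]
  exact pvStripGetD ((PySem.Str.split? l0 "|||").getD []) i

theorem add_lines_to_line_py_eq_alt (lines : List String) (k : Int) (addon_lines : List String)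
    (hpre : Pre_add_lines_to_line_py lines k addon_lines) :
    add_lines_to_line_py lines k addon_lines = add_lines_to_line_py_alt lines k addon_lines := by
  obtain ⟨-, hlen⟩ := hpre
  simp only [add_lines_to_line_py, add_lines_to_line_py_alt]
  rw [pvMerge (fun line => ((PySem.Str.split? line "|||").getD []).map PySem.Str.strip) addon_lines]
  rw [pvColumns _ addon_lines hlen]

-- ===== VERDICT (by name: the statement is the Claim_ definition above) =====
theorem add_lines_to_line_py_spec : Claim_equal_add_lines_to_line_py := by
  intro lines k addon_lines _ hpre
  exact add_lines_to_line_py_eq_alt lines k addon_lines hpre
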